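-- pv_equiv track=rewrite | github.com/rmfulton/AdventOfCode2023 | day13/sol1.py | verticalTest
-- ===== SOURCE A (Python) =====
-- def verticalTest(g):
--     n = len(g)
--     m = len(g[0])
--     nums = []
--     for i in range(m):
--         num = toNum([g[j][i] for j in range(n)])
--         nums.append(num)
--     return reflectionAt(nums)
--
-- def toNum(r):
--     num = 0
--     for c in r:
--         num = num << 1
--         if c == "#":
--             num += 1
--     return num
--
-- def reflectionAt(nums):
--     n = len(nums)
--     for i in range(n-1):
--         perfectReflection = True
--         w = min(i+1, n - i - 1)
--         for j in range(w):
--             L = i - j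
--             R = i + 1 + j
--             if nums[L] != nums[R]:
--                 perfectReflection = False
--                 break
--         if perfectReflection:
--             return i+1
--     return 0
-- ===== SOURCE B (Python) =====
-- def verticalTest(g):
--     # Row-wise candidate filtering: keep the set of axes that every row
--     # (read as its '#'-pattern) reflects at, instead of packing columns
--     # into numbers and scanning them column-wise.
--     m = len(g[0])
--     axes = list(range(1, m))
--     for row in g:
--         bits = [c == '#' for c in row[:m]]
--         axes = [a for a in axes
--                 if all(bits[a - 1 - j] == bits[a + j] for j in range(min(a, m - a)))]
--     return axes[0] if axes else 0
-- ===== Notes on version B (the rewrite author's own statement) =====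
-- stated objective: alternative
-- what changed: Instead of packing each column into an integer and scanning axes column-wise with a nested index loop, B keeps a shrinking list of candidate axes and filters it row by row against each row's '#'-pattern, returning the smallest survivor.
import Mathlib
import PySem

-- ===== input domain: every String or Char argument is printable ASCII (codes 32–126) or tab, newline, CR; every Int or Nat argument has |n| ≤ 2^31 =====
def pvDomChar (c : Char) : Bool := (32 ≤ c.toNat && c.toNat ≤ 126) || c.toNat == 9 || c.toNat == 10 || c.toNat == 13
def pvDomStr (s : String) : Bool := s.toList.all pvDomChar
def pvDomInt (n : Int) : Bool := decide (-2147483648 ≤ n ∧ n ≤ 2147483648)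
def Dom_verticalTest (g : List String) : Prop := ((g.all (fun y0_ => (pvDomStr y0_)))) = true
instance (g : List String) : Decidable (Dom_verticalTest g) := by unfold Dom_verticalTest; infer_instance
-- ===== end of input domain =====

-- B re-implements A's column-axis search row-wise (filtering a candidate-axis list
-- through every row's '#'-pattern); equivalence of the return values is proved on
-- Pre_ (g nonempty, no row shorter than g[0]) — exactly where the Python A returns.

-- ===== PORT A =====
-- toNum: num = num << 1; if c == '#': num += 1
def toNumA (r : List Char) : Int :=
  r.foldl (fun num c =>
    let num := num <<< (1 : Nat)
    if c = '#' then num + 1 else num) 0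

-- inner 'for j in range(w)' loop of reflectionAt; 'all' mirrors the early break
def reflInnerA (nums : List Int) (i w : Nat) : Bool :=
  (List.range w).all (fun j => nums.getD (i - j) 0 == nums.getD (i + 1 + j) 0)

-- outer 'for i in range(n-1)' loop with its early return
def reflLoopA (nums : List Int) (n i : Nat) : Int :=
  if i < n - 1 then
    if reflInnerA nums i (min (i + 1) (n - i - 1)) then (i : Int) + 1
    else reflLoopA nums n (i + 1)
  else 0
termination_by n - 1 - i

def reflectionAtA (nums : List Int) : Int := reflLoopA nums nums.length 0

def verticalTest (g : List String) : Int :=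
  let n := g.length
  let m := (g.getD 0 "").toList.length   -- len(g[0]); g ≠ [] under Pre_
  -- nums.append(toNum([g[j][i] for j in range(n)])) ; indices in range under Pre_
  let nums := (List.range m).foldl (fun nums i =>
    nums ++ [toNumA ((List.range n).map (fun j => (g.getD j "").toList.getD i ' '))]) []
  reflectionAtA nums

-- ===== PORT B =====
-- bits = [c == '#' for c in row[:m]]
def bitsB (m : Nat) (row : String) : List Bool :=
  (row.toList.take m).map (fun c => c == '#')

-- all(bits[a-1-j] == bits[a+j] for j in range(min(a, m-a))) ; indices in range under Pre_
def axisOkB (bits : List Bool) (m a : Nat) : Bool :=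
  (List.range (min a (m - a))).all (fun j => bits.getD (a - 1 - j) false == bits.getD (a + j) false)

def verticalTest_alt (g : List String) : Int :=
  let m := (g.getD 0 "").toList.length   -- len(g[0]); g ≠ [] under Pre_
  let axes := g.foldl (fun axes row => axes.filter (fun a => axisOkB (bitsB m row) m a))
    ((List.range (m - 1)).map (· + 1))   -- list(range(1, m))
  match axes with
  | [] => 0
  | a :: _ => (a : Int)

-- ===== PRECONDITION & SPEC =====
-- Pre_ excludes exactly the inputs where the Python A raises: the empty grid
-- (g[0] is an IndexError) and grids with a row shorter than the first row
-- (g[j][i] is an IndexError while building the columns).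
def Pre_verticalTest (g : List String) : Prop :=
  g ≠ [] ∧ ∀ s ∈ g, (g.getD 0 "").toList.length ≤ s.toList.length
instance (g : List String) : Decidable (Pre_verticalTest g) := by unfold Pre_verticalTest; infer_instance

def pvWitness_verticalTest : List String := ["#.#", "..."]

def Spec_verticalTest (g : List String) (out : Int) : Prop := out = verticalTest_alt g
instance (g : List String) (out : Int) : Decidable (Spec_verticalTest g out) := by unfold Spec_verticalTest; infer_instance

-- ===== CLAIM (what is proved, stated in full; the proofs are below) =====
def Claim_equal_verticalTest : Prop := ∀ (g : List String), Dom_verticalTest g → Pre_verticalTest g → Spec_verticalTest g (verticalTest g)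

-- ===== LEMMAS AND PROOFS =====

-- The step function of toNum, and the value of a partial fold.
theorem toNumA_foldl_shift (r : List Char) (acc : Int) :
    r.foldl (fun (num : Int) c => let num := num <<< (1 : Nat); if c = '#' then num + 1 else num) acc
      = acc * 2 ^ r.length
        + r.foldl (fun (num : Int) c => let num := num <<< (1 : Nat); if c = '#' then num + 1 else num) 0 := by
  induction r generalizing acc with
  | nil => simp
  | cons c r ih =>
    simp only [List.foldl_cons, List.length_cons]
    rw [ih, ih (acc := (fun (num : Int) c => let num := num <<< (1 : Nat); if c = '#' then num + 1 else num) 0 c)]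
    simp only [Int.shiftLeft_eq]
    split_ifs <;> ring

theorem toNumA_bounds (r : List Char) : 0 ≤ toNumA r ∧ toNumA r < 2 ^ r.length := by
  induction r with
  | nil => simp [toNumA]
  | cons c r ih =>
    have e : toNumA (c :: r) = (if c = '#' then 1 else 0) * 2 ^ r.length + toNumA r := by
      simp only [toNumA, List.foldl_cons]
      rw [toNumA_foldl_shift]
      simp [Int.shiftLeft_eq]
    have hX : (0:Int) < 2 ^ r.length := by positivity
    have h2 : (2:Int) ^ (c :: r).length = 2 ^ r.length * 2 := by
      simp [List.length_cons, pow_succ]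
    rw [e, h2]
    split_ifs <;> omega

-- toNum compares equal exactly when the '#'-patterns agree (same length).
theorem toNumA_eq_iff (r s : List Char) (h : r.length = s.length) :
    toNumA r = toNumA s ↔ r.map (fun c => c == '#') = s.map (fun c => c == '#') := by
  induction r generalizing s with
  | nil => cases s with
    | nil => simp
    | cons d s => simp at h
  | cons c r ih =>
    cases s with
    | nil => simp at h
    | cons d s =>
      have hL : r.length = s.length := by simpa using h
      have e1 : toNumA (c :: r) = (if c = '#' then 1 else 0) * 2 ^ r.length + toNumA r := by
        simp only [toNumA, List.foldl_cons]
        rw [toNumA_foldl_shift]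
        simp [Int.shiftLeft_eq]
      have e2 : toNumA (d :: s) = (if d = '#' then 1 else 0) * 2 ^ r.length + toNumA s := by
        simp only [toNumA, List.foldl_cons]
        rw [toNumA_foldl_shift]
        simp [Int.shiftLeft_eq, hL]
      have hr := toNumA_bounds r
      have hs := toNumA_bounds s
      rw [← hL] at hs
      have hX : (0:Int) < 2 ^ r.length := by positivity
      rw [e1, e2, List.map_cons, List.map_cons, List.cons_eq_cons, ← ih s hL]
      generalize (2:Int) ^ r.length = X at hr hs hX ⊢
      by_cases hc : c = '#' <;> by_cases hd : d = '#' <;> simp [hc, hd] <;> omega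

-- A's outer loop is a find? over the remaining indices.
theorem reflLoopA_eq_find (nums : List Int) (n i : Nat) :
    reflLoopA nums n i
      = match (List.range' i (n - 1 - i)).find?
          (fun k => reflInnerA nums k (min (k + 1) (n - k - 1))) with
        | some k => (k : Int) + 1
        | none => 0 := by
  suffices H : ∀ d i, n - 1 - i = d → reflLoopA nums n i
      = (match (List.range' i (n - 1 - i)).find?
          (fun k => reflInnerA nums k (min (k + 1) (n - k - 1))) with
        | some k => (k : Int) + 1
        | none => 0) from H _ i rfl
  intro d
  induction d with
  | zero =>
    intro i hi
    have hni : ¬ i < n - 1 := by omega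
    rw [reflLoopA, hi]
    simp [hni, List.range']
  | succ d ih =>
    intro i hi
    have hlt : i < n - 1 := by omega
    have hd : n - 1 - (i + 1) = d := by omega
    rw [reflLoopA, hi]
    simp only [hlt, if_true, List.range', List.find?_cons]
    cases hp : reflInnerA nums i (min (i + 1) (n - i - 1)) with
    | true => simp
    | false =>
      simp only [Bool.false_eq_true, if_false]
      rw [ih (i + 1) hd, hd]

-- B's fold of filters is one filter by the conjunction over rows.
theorem foldl_filter_eq (rows : List String) (p : String → Nat → Bool) (init : List Nat) :
    rows.foldl (fun axes row => axes.filter (fun a => p row a)) init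
      = init.filter (fun a => rows.all (fun row => p row a)) := by
  induction rows generalizing init with
  | nil => simp
  | cons r rows ih =>
    rw [List.foldl_cons, ih, List.filter_filter]
    have : (fun a => rows.all (fun row => p row a) && p r a)
        = fun a => (r :: rows).all (fun row => p row a) := by
      funext a
      simp [List.all_cons, Bool.and_comm]
    rw [this]

-- Proof-side abbreviations: the character and packed column number A builds.
def chrG (g : List String) (j i : Nat) : Char := (g.getD j "").toList.getD i ' '

def colNumG (g : List String) (i : Nat) : Int :=
  toNumA ((List.range g.length).map (fun j => chrG g j i))

theorem verticalTest_eq (g : List String) :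
    verticalTest g
      = reflLoopA ((List.range ((g.getD 0 "").toList.length)).map (colNumG g))
          ((g.getD 0 "").toList.length) 0 := by
  unfold verticalTest reflectionAtA colNumG chrG
  dsimp only
  rw [PySem.List.foldl_append_singleton_eq_map]
  simp

theorem match_filter_head (l : List Nat) (q : Nat → Bool) :
    (match l.filter q with | [] => (0:Int) | a :: _ => (a:Int))
      = match l.find? q with | some a => (a : Int) + 0 | none => 0 := by
  rw [← List.head?_filter]
  cases l.filter q <;> simp

theorem alt_eq (g : List String) :
    verticalTest_alt g
      = match ((List.range ((g.getD 0 "").toList.length - 1)).map (· + 1)).find?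
          (fun a => g.all (fun row =>
            axisOkB (bitsB ((g.getD 0 "").toList.length) row) ((g.getD 0 "").toList.length) a)) with
        | some a => (a : Int) + 0
        | none => 0 := by
  unfold verticalTest_alt
  dsimp only
  rw [foldl_filter_eq, match_filter_head]

-- bits of row[:m] at an in-range index
theorem bitsB_getD_eq (row : String) (m t : Nat) (ht : t < m) (hm : m ≤ row.toList.length) :
    (bitsB m row).getD t false = (row.toList.getD t ' ' == '#') := by
  have hlen : (List.take m row.toList).length = m := by
    rw [List.length_take]
    omega
  unfold bitsB
  rw [List.getD_eq_getElem _ _ (by rw [List.length_map, hlen]; exact ht), List.getElem_map,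
      List.getElem_take, List.getD_eq_getElem _ _ (by omega)]

-- two packed columns are equal iff every row's '#'-bits agree at the two indices
theorem col_eq_iff (g : List String) (L R : Nat) :
    colNumG g L = colNumG g R
      ↔ ∀ j, j < g.length → ((chrG g j L == '#') = (chrG g j R == '#')) := by
  unfold colNumG
  rw [toNumA_eq_iff _ _ (by simp), List.map_map, List.map_map, List.map_eq_map_iff]
  simp

-- pointwise equality of the two search predicates, at axis a = k+1
theorem pred_eq (g : List String) (hrows : ∀ s ∈ g, (g.getD 0 "").toList.length ≤ s.toList.length)
    (k : Nat) (hk : k + 1 < (g.getD 0 "").toList.length) :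
    reflInnerA ((List.range ((g.getD 0 "").toList.length)).map (colNumG g)) k
        (min (k + 1) ((g.getD 0 "").toList.length - k - 1))
      = g.all (fun row =>
          axisOkB (bitsB ((g.getD 0 "").toList.length) row) ((g.getD 0 "").toList.length) (k + 1)) := by
  set m := (g.getD 0 "").toList.length with hm
  have hw : min (k + 1) (m - (k + 1)) = min (k + 1) (m - k - 1) := by omega
  rw [Bool.eq_iff_iff]
  simp only [reflInnerA, axisOkB, List.all_eq_true, List.mem_range, hw]
  constructor
  · intro hA row hrow j hj
    have hjk : j < min (k + 1) (m - k - 1) := hj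
    have h1 : k - j < m := by omega
    have h2 : k + 1 + j < m := by omega
    have := hA j hj
    rw [PySem.List.getD_map_range _ _ _ _ h1, PySem.List.getD_map_range _ _ _ _ h2, beq_iff_eq] at this
    obtain ⟨i, hi, rfl⟩ := List.mem_iff_getElem.mp hrow
    have hrl : m ≤ g[i].toList.length := hrows _ hrow
    have hg : g.getD i "" = g[i] := List.getD_eq_getElem _ _ hi
    have hb := (col_eq_iff g (k - j) (k + 1 + j)).mp this i hi
    rw [show k + 1 - 1 - j = k - j from by omega]
    rw [bitsB_getD_eq _ _ _ h1 hrl, bitsB_getD_eq _ _ _ h2 hrl, beq_iff_eq]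
    unfold chrG at hb
    rw [hg] at hb
    exact hb
  · intro hB j hj
    have h1 : k - j < m := by omega
    have h2 : k + 1 + j < m := by omega
    rw [PySem.List.getD_map_range _ _ _ _ h1, PySem.List.getD_map_range _ _ _ _ h2, beq_iff_eq]
    rw [col_eq_iff]
    intro i hi
    have hrow : g[i] ∈ g := List.getElem_mem hi
    have hrl : m ≤ g[i].toList.length := hrows _ hrow
    have hg : g.getD i "" = g[i] := List.getD_eq_getElem _ _ hi
    have hb := hB g[i] hrow j hj
    rw [show k + 1 - 1 - j = k - j from by omega] at hb
    rw [bitsB_getD_eq _ _ _ h1 hrl, bitsB_getD_eq _ _ _ h2 hrl, beq_iff_eq] at hb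
    unfold chrG
    rw [hg]
    exact hb

-- find? respects pointwise-equal predicates
theorem find?_congr_mem (l : List Nat) (p q : Nat → Bool) (h : ∀ x ∈ l, p x = q x) :
    l.find? p = l.find? q := by
  induction l with
  | nil => rfl
  | cons a t ih =>
    simp only [List.find?_cons, h a (by simp)]
    split
    · rfl
    · exact ih (fun x hx => h x (by simp [hx]))

-- ===== VERDICT (by name: the statement is the Claim_ definition above) =====
theorem verticalTest_spec : Claim_equal_verticalTest := by
  intro g _ hpre
  unfold Spec_verticalTest
  obtain ⟨hne, hrows⟩ := hpre
  rw [verticalTest_eq, alt_eq, reflLoopA_eq_find]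
  set m := (g.getD 0 "").toList.length with hm
  rw [Nat.sub_zero, ← List.range_eq_range', List.find?_map]
  have hcong : (List.range (m - 1)).find?
        ((fun a => g.all (fun row => axisOkB (bitsB m row) m a)) ∘ (fun x => x + 1))
      = (List.range (m - 1)).find?
        (fun k => reflInnerA ((List.range m).map (colNumG g)) k (min (k + 1) (m - k - 1))) := by
    apply find?_congr_mem
    intro k hkmem
    have hk : k + 1 < m := by
      have := List.mem_range.mp hkmem
      omega
    simp only [Function.comp]
    exact (pred_eq g hrows k hk).symm
  rw [hcong]
  cases (List.range (m - 1)).find?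
      (fun k => reflInnerA ((List.range m).map (colNumG g)) k (min (k + 1) (m - k - 1))) <;> simp
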